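-- pv_equiv track=rewrite | github.com/Linho1150/CODING_TEST | PROGRAMMERS/모의고사.py | solution
-- ===== SOURCE A (Python) =====
-- def solution(answers):
--     result=[0,0,0]
--     answer=[]
--     section1=[1,2,3,4,5]
--     section2=[2,1,2,3,2,4,2,5]
--     section3=[3,3,1,1,2,2,4,4,5,5]
--
--     result[0]=step(answers,section1)
--     result[1]=step(answers,section2)
--     result[2]=step(answers,section3)
--
--     value=max(result)
--     for tmp in range(len(result)):
--         if result[tmp]==value:
--             answer.append(tmp+1)
--
--     return answer
--
-- def step(target,section):
--     cnt=0
--     score=0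
--     for tmp in target:
--         if tmp == section[cnt%len(section)]:
--             score=score+1
--         cnt=cnt+1
--     return score
-- ===== SOURCE B (Python) =====
-- def solution(answers):
--     p1 = [1, 2, 3, 4, 5]
--     p2 = [2, 1, 2, 3, 2, 4, 2, 5]
--     p3 = [3, 3, 1, 1, 2, 2, 4, 4, 5, 5]
--     s1 = s2 = s3 = 0
--     for i, a in enumerate(answers):
--         if a == p1[i % 5]:
--             s1 += 1
--         if a == p2[i % 8]:
--             s2 += 1
--         if a == p3[i % 10]:
--             s3 += 1
--     m = max(s1, s2, s3)
--     return [j + 1 for j, s in enumerate((s1, s2, s3)) if s == m]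
-- ===== Notes on version B (the rewrite author's own statement) =====
-- stated objective: alternative
-- what changed: Replaces the per-pattern helper and its three separate scans of the answer list with a single enumerate pass that maintains all three scores at once, then a list comprehension over the score triple for the winners.
import Mathlib
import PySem

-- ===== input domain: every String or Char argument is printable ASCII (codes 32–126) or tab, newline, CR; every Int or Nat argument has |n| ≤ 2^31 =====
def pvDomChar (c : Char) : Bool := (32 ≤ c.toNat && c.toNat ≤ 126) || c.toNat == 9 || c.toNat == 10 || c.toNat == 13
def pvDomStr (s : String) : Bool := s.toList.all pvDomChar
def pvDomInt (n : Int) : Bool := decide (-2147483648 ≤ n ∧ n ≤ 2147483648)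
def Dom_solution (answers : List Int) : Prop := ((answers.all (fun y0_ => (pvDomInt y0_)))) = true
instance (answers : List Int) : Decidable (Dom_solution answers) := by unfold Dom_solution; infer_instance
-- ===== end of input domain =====

-- B fuses A's three per-pattern scans of the answer list into one enumerate pass
-- keeping all three scores at once (objective: alternative decomposition, same cost).


-- ===== PORT A =====
-- helper 'step': for tmp in target: if tmp == section[cnt % len(section)]: score += 1; cnt += 1
def stepA (target : List Int) (sec : List Int) : Int :=
  (target.foldl
    (fun (st : Int × Int) tmp =>
      (st.1 + 1,
       if tmp = PySem.List.pyGetD sec (PySem.Int.mod st.1 (sec.length : Int)) 0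
       then st.2 + 1 else st.2))
    ((0 : Int), (0 : Int))).2

def solution (answers : List Int) : List Int :=
  let section1 : List Int := [1, 2, 3, 4, 5]
  let section2 : List Int := [2, 1, 2, 3, 2, 4, 2, 5]
  let section3 : List Int := [3, 3, 1, 1, 2, 2, 4, 4, 5, 5]
  let result : List Int := [stepA answers section1, stepA answers section2, stepA answers section3]
  let value : Int := (PySem.List.max? result (fun x => x)).getD 0   -- max(result); result is nonempty
  (PySem.List.pyRange 0 (result.length : Int) 1).foldl
    (fun acc tmp => if PySem.List.pyGetD result tmp 0 = value then acc ++ [tmp + 1] else acc) []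

-- ===== PORT B =====
def solution_alt (answers : List Int) : List Int :=
  let p1 : List Int := [1, 2, 3, 4, 5]
  let p2 : List Int := [2, 1, 2, 3, 2, 4, 2, 5]
  let p3 : List Int := [3, 3, 1, 1, 2, 2, 4, 4, 5, 5]
  let s : Int × Int × Int :=
    (PySem.List.enumerate answers 0).foldl
      (fun (s : Int × Int × Int) ia =>
        (if ia.2 = PySem.List.pyGetD p1 (PySem.Int.mod ia.1 5) 0 then s.1 + 1 else s.1,
         if ia.2 = PySem.List.pyGetD p2 (PySem.Int.mod ia.1 8) 0 then s.2.1 + 1 else s.2.1,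
         if ia.2 = PySem.List.pyGetD p3 (PySem.Int.mod ia.1 10) 0 then s.2.2 + 1 else s.2.2))
      (0, 0, 0)
  let m : Int := max (max s.1 s.2.1) s.2.2   -- max(s1, s2, s3)
  ((PySem.List.enumerate [s.1, s.2.1, s.2.2] 0).filter (fun js => js.2 == m)).map
    (fun js => js.1 + 1)

-- ===== PRECONDITION & SPEC =====
def Spec_solution (answers : List Int) (out : List Int) : Prop := out = solution_alt answers
instance (answers : List Int) (out : List Int) : Decidable (Spec_solution answers out) := by unfold Spec_solution; infer_instance

-- ===== CLAIM (what is proved, stated in full; the proofs are below) =====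
def Claim_equal_solution : Prop := ∀ (answers : List Int), Dom_solution answers → Spec_solution answers (solution answers)

-- ===== LEMMAS AND PROOFS =====

-- The fused single-pass fold of B computes the score triple of A's three separate scans,
-- generalised over the starting index and starting scores.
theorem fused_fold_eq (xs : List Int) : ∀ (i a b c : Int),
    (PySem.List.enumerate xs i).foldl
      (fun (s : Int × Int × Int) ia =>
        (if ia.2 = PySem.List.pyGetD [1,2,3,4,5] (PySem.Int.mod ia.1 5) 0 then s.1 + 1 else s.1,
         if ia.2 = PySem.List.pyGetD [2,1,2,3,2,4,2,5] (PySem.Int.mod ia.1 8) 0 then s.2.1 + 1 else s.2.1,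
         if ia.2 = PySem.List.pyGetD [3,3,1,1,2,2,4,4,5,5] (PySem.Int.mod ia.1 10) 0 then s.2.2 + 1 else s.2.2))
      (a, b, c)
    = ((xs.foldl (fun (st : Int × Int) tmp =>
          (st.1 + 1, if tmp = PySem.List.pyGetD [1,2,3,4,5] (PySem.Int.mod st.1 5) 0 then st.2 + 1 else st.2)) (i, a)).2,
       (xs.foldl (fun (st : Int × Int) tmp =>
          (st.1 + 1, if tmp = PySem.List.pyGetD [2,1,2,3,2,4,2,5] (PySem.Int.mod st.1 8) 0 then st.2 + 1 else st.2)) (i, b)).2,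
       (xs.foldl (fun (st : Int × Int) tmp =>
          (st.1 + 1, if tmp = PySem.List.pyGetD [3,3,1,1,2,2,4,4,5,5] (PySem.Int.mod st.1 10) 0 then st.2 + 1 else st.2)) (i, c)).2) := by
  induction xs with
  | nil => intro i a b c; simp [PySem.List.enumerate_nil]
  | cons x t ih =>
      intro i a b c
      simp only [PySem.List.enumerate_cons, List.foldl_cons]
      exact ih (i + 1) _ _ _

-- The two tails (max + winner selection) agree for any score triple.
theorem tails_eq (r1 r2 r3 : Int) :
    (PySem.List.pyRange 0 (([r1, r2, r3] : List Int).length : Int) 1).foldl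
      (fun acc tmp => if PySem.List.pyGetD [r1, r2, r3] tmp 0
                         = (PySem.List.max? [r1, r2, r3] (fun x => x)).getD 0
                      then acc ++ [tmp + 1] else acc) []
    = ((PySem.List.enumerate [r1, r2, r3] 0).filter
         (fun js => js.2 == max (max r1 r2) r3)).map (fun js => js.1 + 1) := by
  simp only [List.length_cons, List.length_nil]
  have hr : PySem.List.pyRange 0 ((0 + 1 + 1 + 1 : Nat) : Int) 1 = [0, 1, 2] := by decide
  rw [hr, PySem.List.max?_id_cons]
  have h0 : PySem.List.pyGetD [r1, r2, r3] 0 0 = r1 := by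
    norm_num [PySem.List.pyGetD, PySem.List.pyGet?, PySem.List.pyIdx?]
  have h1 : PySem.List.pyGetD [r1, r2, r3] 1 0 = r2 := by
    norm_num [PySem.List.pyGetD, PySem.List.pyGet?, PySem.List.pyIdx?]
  have h2 : PySem.List.pyGetD [r1, r2, r3] 2 0 = r3 := by
    norm_num [PySem.List.pyGetD, PySem.List.pyGet?, PySem.List.pyIdx?]
    rfl
  simp only [PySem.List.enumerate_cons, PySem.List.enumerate_nil, List.foldl_cons,
    List.foldl_nil, Option.getD_some, h0, h1, h2]
  clear hr h0 h1 h2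
  simp only [List.filter_cons, List.filter_nil, beq_iff_eq]
  split_ifs <;> simp

-- ===== VERDICT (by name: the statement is the Claim_ definition above) =====
theorem solution_spec : Claim_equal_solution := by
  intro answers _
  unfold Spec_solution
  show solution answers = solution_alt answers
  simp only [solution, solution_alt, stepA]
  rw [fused_fold_eq]
  exact tails_eq _ _ _
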